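-- pv_equiv track=rewrite | github.com/EnzoJP/Algoritmos-2 | practicas/tp-ada/code/main.py | subsecuenciaCreciente
-- ===== SOURCE A (Python) =====
-- def subsecuenciaCreciente(numeros):
--     def Srec(numeros,ind,res,head):
--         Lmen=[]
--         Lmay=[]
--         if len(numeros)==0:
--             return res
--         for i in range(0,len(numeros)):
--             if numeros[i]<= head:
--                 Lmen.append(numeros[i])
--             else:
--                 Lmay.append(numeros[i])
--         res.append(head)
--         if len(Lmay) > 0:
--             head=Lmay[0]
--         return Srec(Lmay,ind+1,res,head)
--     head=numeros[0]
--     return Srec(numeros,1,[],head)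
-- ===== SOURCE B (Python) =====
-- def subsecuenciaCreciente(numeros):
--     head = numeros[0]
--     res = [head]
--     for x in numeros[1:]:
--         if head < x:
--             res.append(x)
--             head = x
--     return res
-- ===== Notes on version B (the rewrite author's own statement) =====
-- stated objective: faster
-- what changed: Replaced the recursive repeated partitioning (filter the list against the current head on every recursion level) by a single left-to-right pass that keeps the current head and appends each element strictly greater than it.
import Mathlib
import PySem

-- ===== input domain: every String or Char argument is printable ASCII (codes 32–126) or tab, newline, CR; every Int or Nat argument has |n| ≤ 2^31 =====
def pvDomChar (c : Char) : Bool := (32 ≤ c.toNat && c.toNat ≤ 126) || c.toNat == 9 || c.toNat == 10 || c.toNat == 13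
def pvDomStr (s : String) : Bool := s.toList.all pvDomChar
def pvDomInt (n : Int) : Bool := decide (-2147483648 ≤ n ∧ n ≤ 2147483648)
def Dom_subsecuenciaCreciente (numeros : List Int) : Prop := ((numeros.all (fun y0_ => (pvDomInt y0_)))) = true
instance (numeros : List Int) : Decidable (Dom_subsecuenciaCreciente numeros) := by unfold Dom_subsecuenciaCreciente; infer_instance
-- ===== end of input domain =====

-- B replaces A's recursive re-partitioning (O(n^2)) by one linear greedy pass; return value only.

-- ===== PORT A =====
-- the 'for i in range(0,len(numeros))' loop of Srec, building (Lmen, Lmay)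
def pvPartitionLoop (head : Int) (numeros : List Int) : List Int × List Int :=
  numeros.foldl
    (fun acc x => if x ≤ head then (acc.1 ++ [x], acc.2) else (acc.1, acc.2 ++ [x]))
    ([], [])

-- characterisation of the partition loop, needed for termination of pvSrec
theorem pvPartitionLoop_snd (head : Int) (numeros : List Int) :
    (pvPartitionLoop head numeros).2 = numeros.filter (fun x => !decide (x ≤ head)) := by
  suffices h : ∀ (xs : List Int) (a b : List Int),
      (xs.foldl (fun (acc : List Int × List Int) x =>
        if x ≤ head then (acc.1 ++ [x], acc.2) else (acc.1, acc.2 ++ [x])) (a, b)).2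
      = b ++ xs.filter (fun x => !decide (x ≤ head)) by
    simpa using h numeros [] []
  intro xs
  induction xs with
  | nil => intro a b; simp
  | cons x t ih =>
    intro a b
    by_cases hx : x ≤ head <;> simp [hx, ih]

-- inner recursive function Srec of A
def pvSrec (numeros : List Int) (ind : Int) (res : List Int) (head : Int) : List Int :=
  if numeros.length = 0 then res
  else
    let Lmay := (pvPartitionLoop head numeros).2
    let res' := res ++ [head]
    let head' := if Lmay.length > 0 then Lmay[0]! else head
    pvSrec Lmay (ind + 1) res' head'
termination_by 2 * numeros.length + (if numeros.all (fun x => !decide (x ≤ head)) then 1 else 0)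
decreasing_by
  rename_i hne
  simp only [pvPartitionLoop_snd]
  by_cases hall : numeros.all (fun x => !decide (x ≤ head))
  · -- every element is > head: the filter keeps everything, but the new head is its first element
    have hfil : numeros.filter (fun x => !decide (x ≤ head)) = numeros :=
      List.filter_eq_self.mpr (by intro a ha; exact (List.all_eq_true.mp hall) a ha)
    rw [hfil]
    have hnil : numeros ≠ [] := fun h => hne (by simp [h])
    obtain ⟨y, t, rfl⟩ := List.exists_cons_of_ne_nil hnil
    simp [hall]
  · -- some element is ≤ head: the filter strictly shrinks the list
    have hex : ∃ a ∈ numeros, ¬ ((fun x => !decide (x ≤ head)) a = true) := by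
      by_contra hc
      refine hall (List.all_eq_true.mpr (fun a ha => ?_))
      by_contra hpa
      exact hc ⟨a, ha, hpa⟩
    have hlt : (numeros.filter (fun x => !decide (x ≤ head))).length < numeros.length :=
      List.length_filter_lt_length_iff_exists.mpr hex
    split_ifs <;> omega

def subsecuenciaCreciente (numeros : List Int) : List Int :=
  match numeros with
  | [] => []          -- A raises IndexError here (numeros[0]); excluded by Pre_
  | h :: _ => pvSrec numeros 1 [] h

-- ===== PORT B =====
def subsecuenciaCreciente_alt (numeros : List Int) : List Int :=
  match numeros with
  | [] => []          -- B raises IndexError here (numeros[0]); excluded by Pre_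
  | h :: t =>
    (t.foldl (fun (acc : List Int × Int) x =>
        if acc.2 < x then (acc.1 ++ [x], x) else acc) ([h], h)).1

-- ===== PRECONDITION & SPEC =====
-- Pre_ excludes only the empty list, on which A raises IndexError (numeros[0]).
def Pre_subsecuenciaCreciente (numeros : List Int) : Prop := numeros ≠ []
instance (numeros : List Int) : Decidable (Pre_subsecuenciaCreciente numeros) := by
  unfold Pre_subsecuenciaCreciente; infer_instance
def pvWitness_subsecuenciaCreciente : List Int := [3, 1, 4, 1, 5]

def Spec_subsecuenciaCreciente (numeros : List Int) (out : List Int) : Prop := out = subsecuenciaCreciente_alt numeros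
instance (numeros : List Int) (out : List Int) : Decidable (Spec_subsecuenciaCreciente numeros out) := by unfold Spec_subsecuenciaCreciente; infer_instance

-- ===== CLAIM (what is proved, stated in full; the proofs are below) =====
def Claim_equal_subsecuenciaCreciente : Prop := ∀ (numeros : List Int), Dom_subsecuenciaCreciente numeros → Pre_subsecuenciaCreciente numeros → Spec_subsecuenciaCreciente numeros (subsecuenciaCreciente numeros)

-- ===== LEMMAS AND PROOFS =====

-- the abstract greedy pass: keep elements strictly greater than the running head
def pvGreedy (head : Int) : List Int → List Int
  | [] => []
  | x :: t => if head < x then x :: pvGreedy x t else pvGreedy head t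

theorem pvGreedy_filter {h h' : Int} (hle : h ≤ h') (xs : List Int) :
    pvGreedy h' (xs.filter (fun x => !decide (x ≤ h))) = pvGreedy h' xs := by
  induction xs generalizing h h' with
  | nil => simp [pvGreedy]
  | cons x t ih =>
    by_cases hx : x ≤ h
    · have hx' : ¬ h' < x := not_lt.mpr (hx.trans hle)
      simp [List.filter_cons, hx, pvGreedy, hx', ih hle]
    · rw [not_le] at hx
      by_cases hx' : h' < x
      · simp [List.filter_cons, not_le.mpr hx, pvGreedy, hx', ih (le_of_lt hx)]
      · simp [List.filter_cons, not_le.mpr hx, pvGreedy, hx', ih hle]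

theorem pvSrec_eq (numeros : List Int) (ind : Int) (res : List Int) (head : Int) :
    pvSrec numeros ind res head =
      if numeros.isEmpty then res else res ++ head :: pvGreedy head numeros := by
  induction numeros, ind, res, head using pvSrec.induct with
  | case1 numeros ind res head hemp =>
    rw [pvSrec, if_pos hemp]
    simp [List.eq_nil_of_length_eq_zero hemp]
  | case2 numeros ind res head hne Lmay res' head' ih =>
    rw [pvSrec, if_neg hne]
    show pvSrec Lmay (ind + 1) res' head' = _
    rw [ih]
    have hL : Lmay = numeros.filter (fun x => !decide (x ≤ head)) := pvPartitionLoop_snd head numeros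
    have hg : pvGreedy head numeros = pvGreedy head Lmay := by
      rw [hL, pvGreedy_filter (le_refl head)]
    have hnum : numeros ≠ [] := fun h => hne (by simp [h])
    rcases hLe : Lmay with _ | ⟨y, t⟩
    · have hg0 : pvGreedy head numeros = [] := by rw [hg, hLe]; rfl
      simp [hLe, hnum, hg0, show res' = res ++ [head] from rfl]
    · have hy : head < y := by
        have hmem : y ∈ numeros.filter (fun x => !decide (x ≤ head)) := by
          rw [← hL, hLe]; simp
        have := (List.mem_filter.mp hmem).2
        simpa using this
      have hhead' : head' = y := by
        show (if Lmay.length > 0 then Lmay[0]! else head) = y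
        rw [hLe]; simp
      have hgy : pvGreedy head numeros = y :: pvGreedy y t := by
        rw [hg, hLe, pvGreedy, if_pos hy]
      simp [hLe, hnum, hgy, hhead', pvGreedy, show res' = res ++ [head] from rfl]

theorem pvAltLoop_eq (t : List Int) (res : List Int) (head : Int) :
    (t.foldl (fun (acc : List Int × Int) x =>
        if acc.2 < x then (acc.1 ++ [x], x) else acc) (res, head)).1
      = res ++ pvGreedy head t := by
  induction t generalizing res head with
  | nil => simp [pvGreedy]
  | cons x s ih =>
    by_cases hx : head < x
    · simp [pvGreedy, hx, ih]
    · simp [pvGreedy, hx, ih]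

-- ===== VERDICT (by name: the statement is the Claim_ definition above) =====
theorem subsecuenciaCreciente_spec : Claim_equal_subsecuenciaCreciente := by
  intro numeros _ hpre
  unfold Spec_subsecuenciaCreciente
  obtain ⟨h, t, rfl⟩ := List.exists_cons_of_ne_nil hpre
  show pvSrec (h :: t) 1 [] h =
    (t.foldl (fun (acc : List Int × Int) x =>
        if acc.2 < x then (acc.1 ++ [x], x) else acc) ([h], h)).1
  rw [pvSrec_eq, pvAltLoop_eq]
  simp [pvGreedy]
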